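-- pv_equiv track=rewrite | github.com/mjschust/conformal-blocks | fusion_prod/cbd.py | _insertsort_parity
-- ===== SOURCE A (Python) =====
-- def _insertsort_parity(coords):
--     ret_list = list(coords)
--
--     parity = 1
--     for i in range(1, len(ret_list)):
--         j = i
--         while j > 0 and ret_list[j - 1] < ret_list[j]:
--             ret_list[j - 1], ret_list[j] = ret_list[j], ret_list[j - 1]
--             parity = parity * -1
--             j = j - 1
--
--     return ret_list, parity
-- ===== SOURCE B (Python) =====
-- def _insertsort_parity(coords):
--     # Descending merge sort counting strict inversions; parity = (-1)**inversions.
--     def sort_count(a):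
--         n = len(a)
--         if n < 2:
--             return a, 0
--         left, c_left = sort_count(a[:n // 2])
--         right, c_right = sort_count(a[n // 2:])
--         merged = []
--         inv = c_left + c_right
--         i = j = 0
--         while i < len(left) and j < len(right):
--             if left[i] >= right[j]:
--                 merged.append(left[i])
--                 i += 1
--             else:
--                 inv += len(left) - i
--                 merged.append(right[j])
--                 j += 1
--         merged += left[i:]
--         merged += right[j:]
--         return merged, inv
--     out, inv = sort_count(list(coords))
--     return out, -1 if inv % 2 else 1
-- ===== Notes on version B (the rewrite author's own statement) =====
-- stated objective: faster
-- what changed: Replaces A's O(n^2) adjacent-swap insertion sort (parity flipped per swap) by a divide-and-conquer merge sort that counts strict inversions during the merge and derives the parity as (-1)^inversions.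
import Mathlib
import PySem

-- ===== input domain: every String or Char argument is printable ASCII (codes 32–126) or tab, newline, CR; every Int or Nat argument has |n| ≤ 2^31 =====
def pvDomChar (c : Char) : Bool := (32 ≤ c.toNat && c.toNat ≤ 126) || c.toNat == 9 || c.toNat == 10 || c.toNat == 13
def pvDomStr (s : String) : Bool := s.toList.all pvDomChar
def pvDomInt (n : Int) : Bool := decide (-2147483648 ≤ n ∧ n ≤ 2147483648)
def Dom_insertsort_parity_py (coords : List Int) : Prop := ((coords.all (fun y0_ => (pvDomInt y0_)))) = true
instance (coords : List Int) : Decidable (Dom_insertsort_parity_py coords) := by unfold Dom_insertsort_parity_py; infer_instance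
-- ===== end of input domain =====

-- B replaces A's swap-counting insertion sort by a merge sort that counts strict inversions
-- (same descending order, parity = (-1)^inversions); measurably faster on large inputs.

-- ===== PORT A =====
-- inner `while j > 0 and ret_list[j-1] < ret_list[j]` loop: state (ret_list, parity), j counts down
def pvInnerA : List Int → Int → Nat → List Int × Int
  | l, p, 0 => (l, p)
  | l, p, j + 1 =>
    if l.getD j 0 < l.getD (j + 1) 0 then
      pvInnerA ((l.set j (l.getD (j + 1) 0)).set (j + 1) (l.getD j 0)) (p * -1) j
    else (l, p)

def insertsort_parity_py (coords : List Int) : List Int × Int :=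
  (PySem.List.pyRange 1 (coords.length : Int) 1).foldl
    (fun st i => pvInnerA st.1 st.2 i.toNat) (coords, 1)

-- ===== PORT B =====
-- the merge `while i < len(left) and j < len(right)` loop of Source B; `merged` is the accumulator,
-- the index suffixes left[i:], right[j:] are the list arguments (so len(left) - i = ls.length)
def pvMergeLoop (acc ls rs : List Int) (inv : Int) : List Int × Int :=
  match ls, rs with
  | x :: ls', y :: rs' =>
    if x ≥ y then pvMergeLoop (acc ++ [x]) ls' (y :: rs') inv
    else pvMergeLoop (acc ++ [y]) (x :: ls') rs' (inv + ((x :: ls').length : Int))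
  | ls, rs => (acc ++ ls ++ rs, inv)
  termination_by ls.length + rs.length

-- Source B's sort_count: split at n // 2, recurse on both halves, merge counting cross inversions
def pvSortCount (a : List Int) : List Int × Int :=
  if _h : a.length < 2 then (a, 0)
  else
    let l := pvSortCount (PySem.List.slice a none (some (PySem.Int.floordiv (a.length : Int) 2)))
    let r := pvSortCount (PySem.List.slice a (some (PySem.Int.floordiv (a.length : Int) 2)) none)
    pvMergeLoop [] l.1 r.1 (l.2 + r.2)
  termination_by a.length
  decreasing_by
  · have hfd : PySem.Int.floordiv ((a.length : Int)) 2 = ((a.length / 2 : Nat) : Int) := by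
      rw [PySem.Int.floordiv_eq_ediv_of_pos (by norm_num)]; omega
    rw [hfd, PySem.List.slice_to_natCast]
    simp only [List.length_take]
    omega
  · have hfd : PySem.Int.floordiv ((a.length : Int)) 2 = ((a.length / 2 : Nat) : Int) := by
      rw [PySem.Int.floordiv_eq_ediv_of_pos (by norm_num)]; omega
    rw [hfd, PySem.List.slice_from_natCast]
    simp only [List.length_drop]
    omega

def insertsort_parity_py_alt (coords : List Int) : List Int × Int :=
  let s := pvSortCount coords
  (s.1, if s.2 % 2 ≠ 0 then -1 else 1)

-- ===== PRECONDITION & SPEC =====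
def Spec_insertsort_parity_py (coords : List Int) (out : List Int × Int) : Prop := out = insertsort_parity_py_alt coords
instance (coords : List Int) (out : List Int × Int) : Decidable (Spec_insertsort_parity_py coords out) := by unfold Spec_insertsort_parity_py; infer_instance

-- ===== CLAIM (what is proved, stated in full; the proofs are below) =====
def Claim_equal_insertsort_parity_py : Prop := ∀ (coords : List Int), Dom_insertsort_parity_py coords → Spec_insertsort_parity_py coords (insertsort_parity_py coords)

-- ===== LEMMAS AND PROOFS =====

-- Reference characterisation shared by both proofs: stable descending insertion, and the
-- inversion count Σ_j #{i < j | l[i] < l[j]} (pvInvL) with its cross-pair form (pvCross).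
def pvIns (x : Int) : List Int → List Int
  | [] => [x]
  | y :: ys => if x ≤ y then y :: pvIns x ys else x :: y :: ys

def pvInsSort (l : List Int) : List Int := l.foldl (fun acc x => pvIns x acc) []

def pvInvL : List Int → Nat
  | [] => 0
  | x :: xs => xs.countP (fun y => decide (x < y)) + pvInvL xs

def pvCross (L R : List Int) : Nat := (R.map (fun y => L.countP (fun x => decide (x < y)))).sum

def pvMergeD : List Int → List Int → List Int
  | [], rs => rs
  | ls, [] => ls
  | x :: ls, y :: rs => if x ≥ y then x :: pvMergeD ls (y :: rs) else y :: pvMergeD (x :: ls) rs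
  termination_by ls rs => ls.length + rs.length

-- ---- pvIns / pvInsSort / pvInvL facts ----

theorem pvIns_perm (x : Int) (a : List Int) : (pvIns x a).Perm (x :: a) := by
  induction a with
  | nil => simp [pvIns]
  | cons y ys ih =>
    simp only [pvIns]
    split
    · exact (ih.cons y).trans (List.Perm.swap x y ys)
    · exact List.Perm.refl _

theorem pvIns_pairwise (x : Int) (a : List Int) (h : a.Pairwise (· ≥ ·)) :
    (pvIns x a).Pairwise (· ≥ ·) := by
  induction a with
  | nil => simp [pvIns]
  | cons y ys ih =>
    rcases List.pairwise_cons.mp h with ⟨hy, hys⟩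
    simp only [pvIns]
    split
    · rename_i hxy
      refine List.pairwise_cons.mpr ⟨?_, ih hys⟩
      intro z hz
      rcases List.mem_cons.mp ((pvIns_perm x ys).mem_iff.mp hz) with rfl | hz
      · exact hxy
      · exact hy z hz
    · rename_i hxy
      rw [not_le] at hxy
      refine List.pairwise_cons.mpr ⟨?_, h⟩
      intro z hz
      rcases List.mem_cons.mp hz with rfl | hz
      · exact le_of_lt hxy
      · exact le_trans (hy z hz) (le_of_lt hxy)

theorem pvIns_append_lt (x y : Int) (b : List Int) (h : y < x) :
    pvIns x (b ++ [y]) = pvIns x b ++ [y] := by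
  induction b with
  | nil => simp [pvIns, not_le.mpr h]
  | cons z zs ih => simp only [pvIns, List.cons_append]; split <;> simp [ih]

theorem pvIns_eq_append (x : Int) (a : List Int) (h : ∀ y ∈ a, x ≤ y) :
    pvIns x a = a ++ [x] := by
  induction a with
  | nil => simp [pvIns]
  | cons y ys ih =>
    simp only [pvIns, h y (by simp), if_true]
    simp [ih (fun z hz => h z (by simp [hz]))]

theorem pvInvL_append_singleton (a : List Int) (x : Int) :
    pvInvL (a ++ [x]) = pvInvL a + a.countP (fun y => decide (y < x)) := by
  induction a with
  | nil => simp [pvInvL]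
  | cons z zs ih =>
    simp only [List.cons_append, pvInvL, ih, List.countP_append, List.countP_cons]
    simp only [List.countP_nil]
    by_cases h : z < x <;> simp [h] <;> omega

theorem pvInsSort_append_singleton (l : List Int) (x : Int) :
    pvInsSort (l ++ [x]) = pvIns x (pvInsSort l) := by
  simp [pvInsSort, List.foldl_append]

theorem pvInsSort_perm (l : List Int) : (pvInsSort l).Perm l := by
  induction l using List.reverseRecOn with
  | nil => simp [pvInsSort]
  | append_singleton b x ih =>
    rw [pvInsSort_append_singleton]
    exact ((pvIns_perm x (pvInsSort b)).trans (ih.cons x)).trans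
      (List.perm_append_singleton x b).symm

theorem pvInsSort_pairwise (l : List Int) : (pvInsSort l).Pairwise (· ≥ ·) := by
  induction l using List.reverseRecOn with
  | nil => simp [pvInsSort]
  | append_singleton b x ih => rw [pvInsSort_append_singleton]; exact pvIns_pairwise x _ ih

-- ---- the inner while loop bubbles the new element into the sorted prefix ----

theorem pvInnerA_spec (a : List Int) : ∀ (x : Int) (r : List Int) (p : Int),
    a.Pairwise (· ≥ ·) →
    pvInnerA (a ++ x :: r) p a.length =
      (pvIns x a ++ r, p * (-1) ^ (a.countP (fun y => decide (y < x)))) := by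
  induction a using List.reverseRecOn with
  | nil => intro x r p _; simp [pvInnerA, pvIns]
  | append_singleton b y ih =>
    intro x r p hp
    have hb : b.Pairwise (· ≥ ·) := List.Pairwise.sublist (List.sublist_append_left b [y]) hp
    have hxy : ∀ z ∈ b, y ≤ z := by
      intro z hz
      rcases List.pairwise_append.mp hp with ⟨_, _, hba⟩
      exact hba z hz y (by simp)
    have hlist : (b ++ [y]) ++ x :: r = b ++ y :: x :: r := by simp
    have hlen : (b ++ [y]).length = b.length + 1 := by simp
    rw [hlist, hlen]
    have hg1 : (b ++ y :: x :: r).getD b.length 0 = y := by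
      rw [List.getD_eq_getElem?_getD, List.getElem?_append_right (le_refl b.length)]
      simp
    have hg2 : (b ++ y :: x :: r).getD (b.length + 1) 0 = x := by
      rw [List.getD_eq_getElem?_getD,
        List.getElem?_append_right (by omega : b.length ≤ b.length + 1)]
      simp
    by_cases hcmp : y < x
    · have hset : ((b ++ y :: x :: r).set b.length x).set (b.length + 1) y
          = b ++ x :: y :: r := by
        rw [List.set_append_right _ _ (le_refl b.length), Nat.sub_self,
          List.set_append_right _ _ (by omega : b.length ≤ b.length + 1)]
        simp
      have hrec := ih x (y :: r) (p * -1) hb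
      simp only [pvInnerA, hg1, hg2, if_pos hcmp, hset, hrec, Prod.mk.injEq]
      refine ⟨?_, ?_⟩
      · rw [pvIns_append_lt x y b hcmp]; simp
      · rw [List.countP_append]
        simp only [List.countP_cons, List.countP_nil, decide_eq_true_eq, if_pos hcmp]
        ring
    · have hge : ∀ z ∈ b ++ [y], x ≤ z := by
        intro z hz
        rcases List.mem_append.mp hz with hz | hz
        · exact le_trans (not_lt.mp hcmp) (hxy z hz)
        · simp at hz; subst hz; exact not_lt.mp hcmp
      have hcnt : (b ++ [y]).countP (fun y' => decide (y' < x)) = 0 := by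
        rw [List.countP_eq_zero]
        intro z hz
        simp only [decide_eq_true_eq, not_lt]
        exact hge z hz
      simp only [pvInnerA, hg1, hg2, if_neg hcmp, hcnt, pow_zero, mul_one,
        pvIns_eq_append x (b ++ [y]) hge]
      simp

-- state after the outer for-loop has processed indices 1..i-1 (prefix of length i sorted)
def pvState (c : List Int) (i : Nat) : List Int × Int :=
  (pvInsSort (c.take i) ++ c.drop i, (-1) ^ (pvInvL (c.take i)))

theorem pvStep (c : List Int) (i : Nat) (hi : i < c.length) :
    pvInnerA (pvState c i).1 (pvState c i).2 i = pvState c (i + 1) := by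
  unfold pvState
  have hlen : (pvInsSort (c.take i)).length = i := by
    rw [(pvInsSort_perm _).length_eq, List.length_take]
    omega
  rw [List.drop_eq_getElem_cons hi]
  have h := pvInnerA_spec (pvInsSort (c.take i)) (getElem c i hi) (c.drop (i + 1))
    ((-1) ^ (pvInvL (c.take i))) (pvInsSort_pairwise _)
  rw [hlen] at h
  rw [h]
  have htake : c.take (i + 1) = c.take i ++ [getElem c i hi] := by
    rw [List.take_add_one, List.getElem?_eq_getElem hi]
    rfl
  rw [htake, pvInsSort_append_singleton, pvInvL_append_singleton,
    (pvInsSort_perm (c.take i)).countP_eq, pow_add]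

theorem pvFold (c : List Int) (m : Nat) (h1 : 1 ≤ m) (hm : m ≤ c.length) :
    (PySem.List.pyRange 1 (m : Int) 1).foldl
      (fun st i => pvInnerA st.1 st.2 i.toNat) (c, 1) = pvState c m := by
  induction m with
  | zero => omega
  | succ n ih =>
    rcases Nat.lt_or_ge 1 (n + 1) with hgt | hle
    · have hn1 : 1 ≤ n := by omega
      have hcast : ((n + 1 : Nat) : Int) = (n : Int) + 1 := by push_cast; ring
      rw [hcast, PySem.List.pyRange_one_succ_right (by exact_mod_cast hn1),
        List.foldl_append, ih hn1 (by omega)]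
      simp only [List.foldl_cons, List.foldl_nil, Int.toNat_natCast]
      exact pvStep c n (by omega)
    · have hn0 : n = 0 := by omega
      subst hn0
      match c, hm with
      | x :: t, _ =>
        have hr : PySem.List.pyRange 1 (((1 : Nat) : Int)) 1 = [] := by decide
        rw [hr]
        simp [pvState, pvInsSort, pvIns, pvInvL]

theorem pvA_eq (c : List Int) :
    insertsort_parity_py c = (pvInsSort c, (-1) ^ (pvInvL c)) := by
  rcases Nat.eq_zero_or_pos c.length with h0 | hpos
  · have hc : c = [] := List.length_eq_zero_iff.mp h0
    subst hc
    decide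
  · unfold insertsort_parity_py
    rw [pvFold c c.length hpos (le_refl _)]
    unfold pvState
    simp

-- ---- B-side: merge sort counts exactly the inversions ----

theorem pvCross_cons_left (x : Int) (L R : List Int) :
    pvCross (x :: L) R = R.countP (fun y => decide (x < y)) + pvCross L R := by
  induction R with
  | nil => simp [pvCross]
  | cons y rs ih =>
    simp only [pvCross, List.map_cons, List.sum_cons, List.countP_cons] at *
    by_cases h : x < y <;> simp [h] at * <;> omega

theorem pvCross_cons_right (x : Int) (L R : List Int) :
    pvCross L (x :: R) = L.countP (fun y => decide (y < x)) + pvCross L R := by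
  simp [pvCross]

theorem pvInvL_append (u v : List Int) :
    pvInvL (u ++ v) = pvInvL u + pvInvL v + pvCross u v := by
  induction u with
  | nil => simp [pvInvL, pvCross]
  | cons x us ih =>
    simp only [List.cons_append, pvInvL, ih, List.countP_append, pvCross_cons_left]
    omega

theorem pvCross_perm (L L' R R' : List Int) (hL : L.Perm L') (hR : R.Perm R') :
    pvCross L R = pvCross L' R' := by
  unfold pvCross
  calc (R.map fun y => L.countP fun x => decide (x < y)).sum
      = (R.map fun y => L'.countP fun x => decide (x < y)).sum := by
        congr 1
        exact List.map_congr_left (fun y _ => hL.countP_eq _)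
    _ = (R'.map fun y => L'.countP fun x => decide (x < y)).sum :=
        (hR.map _).sum_eq

theorem pvMergeD_nil_left (rs : List Int) : pvMergeD [] rs = rs := by
  rw [pvMergeD.eq_def]

theorem pvMergeD_nil_right (ls : List Int) : pvMergeD ls [] = ls := by
  rw [pvMergeD.eq_def]; cases ls <;> rfl

theorem pvMergeD_cons (x y : Int) (ls rs : List Int) :
    pvMergeD (x :: ls) (y :: rs) =
      if x ≥ y then x :: pvMergeD ls (y :: rs) else y :: pvMergeD (x :: ls) rs := by
  rw [pvMergeD.eq_def]

theorem pvMergeLoop_nil_left (acc rs : List Int) (inv : Int) :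
    pvMergeLoop acc [] rs inv = (acc ++ [] ++ rs, inv) := by
  rw [pvMergeLoop.eq_def]

theorem pvMergeLoop_nil_right (acc ls : List Int) (inv : Int) :
    pvMergeLoop acc ls [] inv = (acc ++ ls ++ [], inv) := by
  rw [pvMergeLoop.eq_def]; cases ls <;> rfl

theorem pvMergeLoop_cons (acc : List Int) (x y : Int) (ls rs : List Int) (inv : Int) :
    pvMergeLoop acc (x :: ls) (y :: rs) inv =
      if x ≥ y then pvMergeLoop (acc ++ [x]) ls (y :: rs) inv
      else pvMergeLoop (acc ++ [y]) (x :: ls) rs (inv + ((x :: ls).length : Int)) := by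
  rw [pvMergeLoop.eq_def]

theorem pvCross_nil_left (R : List Int) : pvCross [] R = 0 := by
  induction R with
  | nil => simp [pvCross]
  | cons y rs ih => simp only [pvCross, List.map_cons, List.sum_cons] at *; simp

theorem pvMergeD_perm (L R : List Int) : (pvMergeD L R).Perm (L ++ R) := by
  fun_induction pvMergeD with
  | case1 rs => simp
  | case2 ls _ => simp
  | case3 x ls y rs hxy ih => exact ih.cons x
  | case4 x ls y rs hxy ih => exact (ih.cons y).trans List.perm_middle.symm

theorem pvMergeD_pairwise (L R : List Int) (hL : L.Pairwise (· ≥ ·))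
    (hR : R.Pairwise (· ≥ ·)) : (pvMergeD L R).Pairwise (· ≥ ·) := by
  fun_induction pvMergeD with
  | case1 rs => exact hR
  | case2 ls _ => exact hL
  | case3 x ls y rs hxy ih =>
    rcases List.pairwise_cons.mp hL with ⟨hx, hls⟩
    refine List.pairwise_cons.mpr ⟨?_, ih hls hR⟩
    intro z hz
    rcases List.mem_append.mp ((pvMergeD_perm ls (y :: rs)).mem_iff.mp hz) with hz | hz
    · exact hx z hz
    · rcases List.mem_cons.mp hz with rfl | hz
      · exact hxy
      · exact le_trans ((List.pairwise_cons.mp hR).1 z hz) hxy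
  | case4 x ls y rs hxy ih =>
    rcases List.pairwise_cons.mp hR with ⟨hy, hrs⟩
    have hxle : x ≤ y := le_of_lt (not_le.mp hxy)
    refine List.pairwise_cons.mpr ⟨?_, ih hL hrs⟩
    intro z hz
    rcases List.mem_append.mp ((pvMergeD_perm (x :: ls) rs).mem_iff.mp hz) with hz | hz
    · rcases List.mem_cons.mp hz with rfl | hz
      · exact hxle
      · exact le_trans ((List.pairwise_cons.mp hL).1 z hz) hxle
    · exact hy z hz

theorem pvMergeLoop_spec (acc ls rs : List Int) (inv : Int)
    (hL : ls.Pairwise (· ≥ ·)) (hR : rs.Pairwise (· ≥ ·)) :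
    pvMergeLoop acc ls rs inv = (acc ++ pvMergeD ls rs, inv + (pvCross ls rs : Int)) := by
  induction ls, rs using pvMergeD.induct generalizing acc inv with
  | case1 rs =>
    rw [pvMergeLoop_nil_left, pvMergeD_nil_left, pvCross_nil_left]
    simp
  | case2 ls _ =>
    rw [pvMergeLoop_nil_right, pvMergeD_nil_right]
    simp [pvCross]
  | case3 x ls' y rs' hxy ih =>
    rcases List.pairwise_cons.mp hL with ⟨hx, hls⟩
    have hcnt : (y :: rs').countP (fun z => decide (x < z)) = 0 := by
      rw [List.countP_eq_zero]
      intro z hz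
      simp only [decide_eq_true_eq, not_lt]
      rcases List.mem_cons.mp hz with rfl | hz
      · exact hxy
      · exact le_trans ((List.pairwise_cons.mp hR).1 z hz) hxy
    rw [pvMergeLoop_cons, if_pos hxy, ih _ _ hls hR, pvMergeD_cons, if_pos hxy,
      pvCross_cons_left, hcnt]
    simp
  | case4 x ls' y rs' hxy ih =>
    rcases List.pairwise_cons.mp hR with ⟨hy, hrs⟩
    have hxlt : x < y := not_le.mp hxy
    have hcnt : (x :: ls').countP (fun z => decide (z < y)) = (x :: ls').length := by
      rw [List.countP_eq_length]
      intro z hz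
      simp only [decide_eq_true_eq]
      rcases List.mem_cons.mp hz with rfl | hz
      · exact hxlt
      · exact lt_of_le_of_lt ((List.pairwise_cons.mp hL).1 z hz) hxlt
    rw [pvMergeLoop_cons, if_neg hxy, ih _ _ hL hrs, pvMergeD_cons, if_neg hxy,
      pvCross_cons_right, hcnt]
    simp only [Prod.mk.injEq]
    refine ⟨by simp, by push_cast; ring⟩

theorem pvSortCount_spec (a : List Int) :
    (pvSortCount a).1.Perm a ∧ (pvSortCount a).1.Pairwise (· ≥ ·) ∧
      (pvSortCount a).2 = (pvInvL a : Int) := by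
  fun_induction pvSortCount with
  | case1 a h =>
    refine ⟨List.Perm.refl _, ?_, ?_⟩
    · match a, h with
      | [], _ => simp
      | [x], _ => simp
    · match a, h with
      | [], _ => simp [pvInvL]
      | [x], _ => simp [pvInvL]
  | case2 a h l r ih1 ih2 =>
    have hfd : PySem.Int.floordiv ((a.length : Int)) 2 = ((a.length / 2 : Nat) : Int) := by
      rw [PySem.Int.floordiv_eq_ediv_of_pos (by norm_num)]; omega
    simp only [l, r, hfd, PySem.List.slice_to_natCast, PySem.List.slice_from_natCast]
    rw [hfd, PySem.List.slice_to_natCast] at ih1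
    rw [hfd, PySem.List.slice_from_natCast] at ih2
    obtain ⟨hp1, hs1, hc1⟩ := ih1
    obtain ⟨hp2, hs2, hc2⟩ := ih2
    rw [pvMergeLoop_spec _ _ _ _ hs1 hs2]
    refine ⟨?_, ?_, ?_⟩
    · simp only [List.nil_append]
      exact ((pvMergeD_perm _ _).trans (hp1.append hp2)).trans
        (by rw [List.take_append_drop])
    · simp only [List.nil_append]
      exact pvMergeD_pairwise _ _ hs1 hs2
    · simp only [hc1, hc2,
        pvCross_perm _ _ _ _ hp1 hp2]
      rw [← List.take_append_drop (a.length / 2) a, pvInvL_append]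
      push_cast
      rw [List.take_append_drop]

theorem pvB_eq (c : List Int) :
    insertsort_parity_py_alt c = (pvInsSort c, (-1) ^ (pvInvL c)) := by
  obtain ⟨hp, hs, hc⟩ := pvSortCount_spec c
  have h1 : (pvSortCount c).1 = pvInsSort c := by
    refine List.Perm.eq_of_pairwise (le := fun a b => a ≥ b) ?_ hs (pvInsSort_pairwise c)
      (hp.trans (pvInsSort_perm c).symm)
    intro a b _ _ h h'
    omega
  unfold insertsort_parity_py_alt
  simp only [h1, hc]
  rcases Nat.even_or_odd (pvInvL c) with he | ho
  · have : ((pvInvL c : Int)) % 2 = 0 := by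
      rcases he with ⟨k, hk⟩
      omega
    simp [this, he.neg_one_pow]
  · have : ¬ ((pvInvL c : Int)) % 2 = 0 := by
      rcases ho with ⟨k, hk⟩
      omega
    simp [this, ho.neg_one_pow]

-- ===== VERDICT (by name: the statement is the Claim_ definition above) =====
theorem insertsort_parity_py_spec : Claim_equal_insertsort_parity_py := by
  intro coords _
  unfold Spec_insertsort_parity_py
  rw [pvA_eq, pvB_eq]
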